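-- pv_equiv track=rewrite | github.com/cdimurro/exergy-lab | backend/app/services/literature_service.py | _parse_white_spaces
-- ===== SOURCE A (Python) =====
-- from typing import List, Dict, Any, Optional
--
-- def _parse_white_spaces(text: str) -> List[Dict[str, str]]:
--     """Parse white space opportunities from AI response."""
--     opportunities = []
--     current = {}
--
--     for line in text.split("\n"):
--         line = line.strip()
--         if not line:
--             if current:
--                 opportunities.append(current)
--                 current = {}
--             continue
--
--         line_lower = line.lower()
--         if "opportunity:" in line_lower:
--             current["opportunity"] = line.split(":", 1)[1].strip()
--         elif "gap evidence:" in line_lower or "evidence:" in line_lower: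
--             current["gap_evidence"] = line.split(":", 1)[1].strip()
--         elif "impact:" in line_lower:
--             current["potential_impact"] = line.split(":", 1)[1].strip()
--         elif "approach:" in line_lower:
--             current["suggested_approach"] = line.split(":", 1)[1].strip()
--         elif "confidence:" in line_lower:
--             current["confidence"] = line.split(":", 1)[1].strip()
--
--     if current:
--         opportunities.append(current)
--
--     return opportunities
-- ===== SOURCE B (Python) =====
-- def _parse_white_spaces(text):
--     def apply_keyword(d, line):
--         low = line.lower()
--         if "opportunity:" in low:
--             d["opportunity"] = line.split(":", 1)[1].strip()
--         elif "gap evidence:" in low or "evidence:" in low: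
--             d["gap_evidence"] = line.split(":", 1)[1].strip()
--         elif "impact:" in low:
--             d["potential_impact"] = line.split(":", 1)[1].strip()
--         elif "approach:" in low:
--             d["suggested_approach"] = line.split(":", 1)[1].strip()
--         elif "confidence:" in low:
--             d["confidence"] = line.split(":", 1)[1].strip()
--         return d
--
--     # phase 1: group consecutive non-blank (after strip) lines into blocks
--     blocks = []
--     block = []
--     for raw in text.split("\n"):
--         s = raw.strip()
--         if s:
--             block.append(s)
--         elif block:
--             blocks.append(block)
--             block = []
--     if block:
--         blocks.append(block)
--
--     # phase 2: one dict per block; drop blocks that produced no fields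
--     dicts = []
--     for b in blocks:
--         d = {}
--         for line in b:
--             d = apply_keyword(d, line)
--         dicts.append(d)
--     return [d for d in dicts if d]
-- ===== Notes on version B (the rewrite author's own statement) =====
-- stated objective: alternative
-- what changed: B replaces A's single flushing loop with mutable (opportunities, current) state by a two-phase pipeline: first group consecutive non-blank stripped lines into blocks, then map each block to a dict and drop blocks yielding no fields.
import Mathlib
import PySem

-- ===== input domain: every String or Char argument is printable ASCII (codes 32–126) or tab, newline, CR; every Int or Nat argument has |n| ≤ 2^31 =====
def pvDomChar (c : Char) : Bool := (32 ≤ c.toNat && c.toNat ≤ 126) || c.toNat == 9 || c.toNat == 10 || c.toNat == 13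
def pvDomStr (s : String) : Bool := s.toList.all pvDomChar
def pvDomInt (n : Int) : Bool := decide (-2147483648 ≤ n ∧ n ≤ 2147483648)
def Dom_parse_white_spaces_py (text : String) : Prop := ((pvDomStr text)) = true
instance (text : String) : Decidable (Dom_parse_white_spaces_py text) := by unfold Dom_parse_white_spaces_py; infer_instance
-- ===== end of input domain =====

-- B re-decomposes A's single flushing loop into a two-phase pipeline (group lines into blocks,
-- then map each block to a field dict and drop empty ones); same cost, alternative structure.


-- ===== PORT A =====
-- text.split("\n") (sep ≠ "", so split? is some; both Pythons start with this)
def pvSplitLines (text : String) : List String :=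
  (PySem.Str.split? text "\n").getD []

-- line.split(":", 1)[1].strip(); only evaluated when ":" occurs in line, so index 1 exists
-- (the "" default is never used there)
def pvAfterColon (line : String) : String :=
  PySem.Str.strip (PySem.List.pyGetD ((PySem.Str.splitMax? line ":" 1).getD []) 1 "")

-- the priority-ordered keyword if-chain both Pythons run on one stripped, non-blank line
def pvApplyKeyword (d : PySem.Dict String String) (line : String) : PySem.Dict String String :=
  let low := PySem.Str.lower line
  if PySem.Str.isIn "opportunity:" low then d.insert "opportunity" (pvAfterColon line)
  else if PySem.Str.isIn "gap evidence:" low || PySem.Str.isIn "evidence:" low then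
    d.insert "gap_evidence" (pvAfterColon line)
  else if PySem.Str.isIn "impact:" low then d.insert "potential_impact" (pvAfterColon line)
  else if PySem.Str.isIn "approach:" low then d.insert "suggested_approach" (pvAfterColon line)
  else if PySem.Str.isIn "confidence:" low then d.insert "confidence" (pvAfterColon line)
  else d

-- one iteration of A's loop over (opportunities, current)
def pvStepA (st : List (List (String × String)) × PySem.Dict String String) (raw : String) :
    List (List (String × String)) × PySem.Dict String String :=
  if PySem.Str.strip raw = "" then
    if st.2.items.isEmpty then st else (st.1 ++ [st.2.items], PySem.Dict.empty)
  else
    (st.1, pvApplyKeyword st.2 (PySem.Str.strip raw))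

-- A's trailing 'if current: opportunities.append(current)'
def pvFinA (st : List (List (String × String)) × PySem.Dict String String) :
    List (List (String × String)) :=
  if st.2.items.isEmpty then st.1 else st.1 ++ [st.2.items]

def parse_white_spaces_py (text : String) : List (List (String × String)) :=
  pvFinA ((pvSplitLines text).foldl pvStepA ([], PySem.Dict.empty))

-- ===== PORT B =====
-- phase 1: group consecutive non-blank stripped lines into blocks
def pvStepBlock (st : List (List String) × List String) (raw : String) :
    List (List String) × List String :=
  if PySem.Str.strip raw ≠ "" then (st.1, st.2 ++ [PySem.Str.strip raw])
  else if st.2 ≠ [] then (st.1 ++ [st.2], [])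
  else st

def pvFinB (st : List (List String) × List String) : List (List String) :=
  if st.2 ≠ [] then st.1 ++ [st.2] else st.1

def pvBlocks (lines : List String) : List (List String) :=
  pvFinB (lines.foldl pvStepBlock ([], []))

-- phase 2: fold the keyword chain over one block
def pvDictOf (block : List String) : PySem.Dict String String :=
  block.foldl pvApplyKeyword PySem.Dict.empty

-- map blocks to dicts, keep the non-empty ones ('[d for d in dicts if d]')
def pvHarvest (blocks : List (List String)) : List (List (String × String)) :=
  (blocks.map (fun b => (pvDictOf b).items)).filter (fun d => !d.isEmpty)

def parse_white_spaces_py_alt (text : String) : List (List (String × String)) :=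
  pvHarvest (pvBlocks (pvSplitLines text))

-- ===== PRECONDITION & SPEC =====
def Spec_parse_white_spaces_py (text : String) (out : List (List (String × String))) : Prop := out = parse_white_spaces_py_alt text
instance (text : String) (out : List (List (String × String))) : Decidable (Spec_parse_white_spaces_py text out) := by unfold Spec_parse_white_spaces_py; infer_instance

-- ===== CLAIM (what is proved, stated in full; the proofs are below) =====
def Claim_equal_parse_white_spaces_py : Prop := ∀ (text : String), Dom_parse_white_spaces_py text → Spec_parse_white_spaces_py text (parse_white_spaces_py text)

-- ===== LEMMAS AND PROOFS =====

-- common reference shape: process the remaining lines given the current dict c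
def pvRun (lines : List String) (c : PySem.Dict String String) : List (List (String × String)) :=
  match lines with
  | [] => if c.items.isEmpty then [] else [c.items]
  | l :: ls =>
    if PySem.Str.strip l = "" then
      (if c.items.isEmpty then [] else [c.items]) ++ pvRun ls PySem.Dict.empty
    else
      pvRun ls (pvApplyKeyword c (PySem.Str.strip l))

theorem pvDict_empty_of_items (c : PySem.Dict String String) (h : c.items.isEmpty = true) :
    c = PySem.Dict.empty := by
  apply PySem.Dict.ext
  simpa [List.isEmpty_iff] using h

theorem pvEmptyItems : ((PySem.Dict.empty : PySem.Dict String String).items.isEmpty) = true := rfl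

theorem pvA_run (lines : List String) (opps : List (List (String × String)))
    (c : PySem.Dict String String) :
    pvFinA (lines.foldl pvStepA (opps, c)) = opps ++ pvRun lines c := by
  induction lines generalizing opps c with
  | nil =>
    simp only [List.foldl_nil, pvRun, pvFinA]
    split <;> simp
  | cons l ls ih =>
    by_cases hs : PySem.Str.strip l = ""
    · by_cases hc : c.items.isEmpty = true
      · have hce := pvDict_empty_of_items c hc
        subst hce
        have hstep : pvStepA (opps, PySem.Dict.empty) l = (opps, PySem.Dict.empty) := by
          simp [pvStepA, hs]
          rfl
        rw [List.foldl_cons, hstep, ih]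
        simp only [pvRun]
        rw [if_pos hs, if_pos pvEmptyItems]
        simp
      · have hstep : pvStepA (opps, c) l = (opps ++ [c.items], PySem.Dict.empty) := by
          simp [pvStepA, hs, hc]
        rw [List.foldl_cons, hstep, ih]
        simp only [pvRun]
        rw [if_pos hs, if_neg hc]
        simp
    · have hstep : pvStepA (opps, c) l = (opps, pvApplyKeyword c (PySem.Str.strip l)) := by
        simp [pvStepA, hs]
      rw [List.foldl_cons, hstep, ih]
      simp only [pvRun]
      rw [if_neg hs]

theorem pvDictOf_append (b : List String) (s : String) :
    pvDictOf (b ++ [s]) = pvApplyKeyword (pvDictOf b) s := by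
  simp [pvDictOf]

theorem pvDictOf_nil : pvDictOf ([] : List String) = PySem.Dict.empty := rfl

theorem pvHarvest_append_singleton (blocks : List (List String)) (b : List String) :
    pvHarvest (blocks ++ [b]) =
      pvHarvest blocks ++ (if (pvDictOf b).items.isEmpty then [] else [(pvDictOf b).items]) := by
  by_cases hd : ((pvDictOf b).items.isEmpty) = true
  · simp [pvHarvest, List.filter, hd]
  · simp [pvHarvest, List.filter, hd]

theorem pvB_run (lines : List String) (blocks : List (List String)) (b : List String) :
    pvHarvest (pvFinB (lines.foldl pvStepBlock (blocks, b))) =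
      pvHarvest blocks ++ pvRun lines (pvDictOf b) := by
  induction lines generalizing blocks b with
  | nil =>
    simp only [List.foldl_nil, pvFinB, pvRun]
    by_cases hb : b = []
    · subst hb
      rw [if_neg (by simp), pvDictOf_nil, if_pos pvEmptyItems]
      simp
    · rw [if_pos hb, pvHarvest_append_singleton]
  | cons l ls ih =>
    by_cases hs : PySem.Str.strip l = ""
    · by_cases hb : b = []
      · subst hb
        have hstep : pvStepBlock (blocks, []) l = (blocks, []) := by
          simp [pvStepBlock, hs]
        rw [List.foldl_cons, hstep, ih, pvDictOf_nil]
        simp only [pvRun]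
        rw [if_pos hs, if_pos pvEmptyItems]
        simp
      · have hstep : pvStepBlock (blocks, b) l = (blocks ++ [b], []) := by
          simp [pvStepBlock, hs, hb]
        rw [List.foldl_cons, hstep, ih (blocks ++ [b]) [], pvDictOf_nil, pvHarvest_append_singleton]
        simp only [pvRun]
        rw [if_pos hs]
        simp
    · have hstep : pvStepBlock (blocks, b) l = (blocks, b ++ [PySem.Str.strip l]) := by
        simp [pvStepBlock, hs]
      rw [List.foldl_cons, hstep, ih blocks (b ++ [PySem.Str.strip l]), pvDictOf_append]
      simp only [pvRun]
      rw [if_neg hs]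

-- ===== VERDICT (by name: the statement is the Claim_ definition above) =====
theorem parse_white_spaces_py_spec : Claim_equal_parse_white_spaces_py := by
  intro text _
  unfold Spec_parse_white_spaces_py parse_white_spaces_py parse_white_spaces_py_alt pvBlocks
  rw [pvA_run, pvB_run, pvDictOf_nil]
  rfl
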